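-- pv_equiv track=rewrite | github.com/wpilibsuite/systemcore-blocks-interface | python_tools/python_util.py | _findEndOfToken
-- ===== SOURCE A (Python) =====
-- def _findEndOfToken(text: str, i: int, delimiters: list[str]):
--   stack = []
--   while i < len(text):
--     ch = text[i]
--     if ch == "(":
--       stack.append(")")
--     elif ch == "[":
--       stack.append("]")
--     else:
--       if len(stack) > 0:
--         # We have some parentheses or brackets that we need to find.
--         if ch == stack[-1]:
--           stack.pop()
--       else:
--         if ch in delimiters:
--           break
--     i += 1
--   return i
-- ===== SOURCE B (Python) =====
-- def _scanToClose(text, i, closer):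
--   # Scan forward from i, recursing into nested brackets; return the index
--   # one past the matching closer, or len(text) if it is never closed.
--   while i < len(text):
--     ch = text[i]
--     if ch == "(":
--       i = _scanToClose(text, i + 1, ")")
--     elif ch == "[":
--       i = _scanToClose(text, i + 1, "]")
--     elif ch == closer:
--       return i + 1
--     else:
--       i += 1
--   return i
--
--
-- def _findEndOfToken(text, i, delimiters):
--   while i < len(text):
--     ch = text[i]
--     if ch == "(":
--       i = _scanToClose(text, i + 1, ")")
--     elif ch == "[":
--       i = _scanToClose(text, i + 1, "]")
--     elif ch in delimiters:
--       break
--     else: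
--       i += 1
--   return i
-- ===== Notes on version B (the rewrite author's own statement) =====
-- stated objective: alternative
-- what changed: Replaces the explicit closer-stack with recursive-descent bracket matching: a helper scanToClose recursively consumes a bracketed group and returns the index one past its matching closer, so the top-level loop keeps no stack and honors delimiters only at depth zero.
import Mathlib
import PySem

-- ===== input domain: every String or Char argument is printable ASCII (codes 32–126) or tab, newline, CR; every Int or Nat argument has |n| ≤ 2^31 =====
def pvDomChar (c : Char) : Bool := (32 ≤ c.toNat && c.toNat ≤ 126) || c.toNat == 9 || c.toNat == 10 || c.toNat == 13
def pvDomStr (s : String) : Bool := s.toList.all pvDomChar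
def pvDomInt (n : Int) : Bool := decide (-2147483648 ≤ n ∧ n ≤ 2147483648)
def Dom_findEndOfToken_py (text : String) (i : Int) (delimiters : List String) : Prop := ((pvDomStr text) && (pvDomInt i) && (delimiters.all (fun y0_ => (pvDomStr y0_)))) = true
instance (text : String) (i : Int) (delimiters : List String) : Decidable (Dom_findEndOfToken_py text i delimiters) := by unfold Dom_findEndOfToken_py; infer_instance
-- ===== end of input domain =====

-- B rewrites A's explicit closer-stack as recursive-descent bracket matching; same values on all of Pre_.

-- ===== PORT A =====
-- A's while loop with its stack of expected closers. The fuel argument is only a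
-- totality guard: each iteration advances i by 1, so the fuel chosen at the call
-- site below ((len - i).toNat + 1) is never exhausted before the loop would end.
def findEndOfTokenA_loop (cs : List Char) (delims : List String) : Nat → Int → List Char → Int
  | 0, i, _ => i
  | f + 1, i, stack =>
    if i < (cs.length : Int) then
      match PySem.List.pyGet? cs i with
      | none => i  -- IndexError in Python (i < -len); excluded by Pre_
      | some ch =>
        if ch = '(' then findEndOfTokenA_loop cs delims f (i + 1) (')' :: stack)
        else if ch = '[' then findEndOfTokenA_loop cs delims f (i + 1) (']' :: stack)
        else
          match stack with
          | top :: rest =>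
            if ch = top then findEndOfTokenA_loop cs delims f (i + 1) rest
            else findEndOfTokenA_loop cs delims f (i + 1) (top :: rest)
          | [] =>
            if delims.contains (String.ofList [ch]) then i
            else findEndOfTokenA_loop cs delims f (i + 1) []
    else i

def findEndOfToken_py (text : String) (i : Int) (delimiters : List String) : Int :=
  findEndOfTokenA_loop text.toList delimiters ((text.toList.length - i).toNat + 1) i []

-- ===== PORT B =====
-- scanToClose from Source B; fuel is the same totality guard (each step advances i by
-- at least 1, proved sufficient in the lemmas below).
def scanToClose (cs : List Char) (closer : Char) : Nat → Int → Int
  | 0, i => i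
  | f + 1, i =>
    if i < (cs.length : Int) then
      match PySem.List.pyGet? cs i with
      | none => i  -- IndexError in Python (i < -len); excluded by Pre_
      | some ch =>
        if ch = '(' then scanToClose cs closer f (scanToClose cs ')' f (i + 1))
        else if ch = '[' then scanToClose cs closer f (scanToClose cs ']' f (i + 1))
        else if ch = closer then i + 1
        else scanToClose cs closer f (i + 1)
    else i

def findEndOfTokenB_loop (cs : List Char) (delims : List String) : Nat → Int → Int
  | 0, i => i
  | f + 1, i =>
    if i < (cs.length : Int) then
      match PySem.List.pyGet? cs i with
      | none => i  -- IndexError in Python (i < -len); excluded by Pre_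
      | some ch =>
        if ch = '(' then findEndOfTokenB_loop cs delims f (scanToClose cs ')' f (i + 1))
        else if ch = '[' then findEndOfTokenB_loop cs delims f (scanToClose cs ']' f (i + 1))
        else if delims.contains (String.ofList [ch]) then i
        else findEndOfTokenB_loop cs delims f (i + 1)
    else i

def findEndOfToken_py_alt (text : String) (i : Int) (delimiters : List String) : Int :=
  findEndOfTokenB_loop text.toList delimiters ((text.toList.length - i).toNat + 1) i

-- ===== PRECONDITION & SPEC =====
-- Pre_ excludes exactly the inputs where Python A raises IndexError: i < -len(text)
-- (then text[i] is read with an out-of-range negative index); B raises there too.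
def Pre_findEndOfToken_py (text : String) (i : Int) (_delimiters : List String) : Prop :=
  -(text.toList.length : Int) ≤ i

instance (text : String) (i : Int) (delimiters : List String) : Decidable (Pre_findEndOfToken_py text i delimiters) := by unfold Pre_findEndOfToken_py; infer_instance

def pvWitness_findEndOfToken_py : String × Int × List String := ("a(b, c) d", 0, [" ", ","])

def Spec_findEndOfToken_py (text : String) (i : Int) (delimiters : List String) (out : Int) : Prop := out = findEndOfToken_py_alt text i delimiters
instance (text : String) (i : Int) (delimiters : List String) (out : Int) : Decidable (Spec_findEndOfToken_py text i delimiters out) := by unfold Spec_findEndOfToken_py; infer_instance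

-- ===== CLAIM (what is proved, stated in full; the proofs are below) =====
def Claim_equal_findEndOfToken_py : Prop := ∀ (text : String) (i : Int) (delimiters : List String), Dom_findEndOfToken_py text i delimiters → Pre_findEndOfToken_py text i delimiters → Spec_findEndOfToken_py text i delimiters (findEndOfToken_py text i delimiters)

-- ===== LEMMAS AND PROOFS =====

-- A's loop does not depend on the exact fuel, as long as it is sufficient.
theorem aloop_stable (cs : List Char) (d : List String) :
    ∀ (fa fb : Nat) (i : Int) (s : List Char),
      (cs.length : Int) - i < fa → (cs.length : Int) - i < fb →
      findEndOfTokenA_loop cs d fa i s = findEndOfTokenA_loop cs d fb i s := by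
  intro fa
  induction fa with
  | zero =>
    intro fb i s ha hb
    have h : ¬ i < (cs.length : Int) := by omega
    cases fb with
    | zero => rfl
    | succ g => simp [findEndOfTokenA_loop, h]
  | succ fa ih =>
    intro fb i s ha hb
    cases fb with
    | zero =>
      have h : ¬ i < (cs.length : Int) := by omega
      simp [findEndOfTokenA_loop, h]
    | succ g =>
      rw [findEndOfTokenA_loop, findEndOfTokenA_loop]
      by_cases h : i < (cs.length : Int)
      · simp only [h, if_true]
        match hg : PySem.List.pyGet? cs i with
        | none => rfl
        | some ch =>
          simp only
          by_cases h1 : ch = '('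
          · simp only [h1, if_true]; exact ih g (i+1) _ (by omega) (by omega)
          · simp only [h1, if_false]
            by_cases h2 : ch = '['
            · simp only [h2, if_true]; exact ih g (i+1) _ (by omega) (by omega)
            · simp only [h2, if_false]
              cases s with
              | nil =>
                simp only
                split_ifs with h4
                · rfl
                · exact ih g (i+1) [] (by omega) (by omega)
              | cons top rest =>
                simp only
                split_ifs with h4
                · exact ih g (i+1) rest (by omega) (by omega)
                · exact ih g (i+1) (top :: rest) (by omega) (by omega)
      · simp [h]

theorem scanToClose_ge (cs : List Char) :
    ∀ (f : Nat) (c : Char) (i : Int), i ≤ scanToClose cs c f i := by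
  intro f
  induction f with
  | zero => intro c i; simp [scanToClose]
  | succ f ih =>
    intro c i
    rw [scanToClose]
    split_ifs with h
    · match hg : PySem.List.pyGet? cs i with
      | none => simp
      | some ch =>
        simp only
        split_ifs with h1 h2 h3
        · exact le_trans (le_trans (by omega) (ih ')' (i+1))) (ih c _)
        · exact le_trans (le_trans (by omega) (ih ']' (i+1))) (ih c _)
        · omega
        · exact le_trans (by omega) (ih c (i+1))
    · simp

-- The crux: A's loop with stack (c :: s) first matches the closer c (ignoring
-- delimiters), which is exactly B's scanToClose, then continues with stack s.
theorem key_lemma (cs : List Char) (d : List String) :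
    ∀ (f : Nat) (i : Int) (c : Char) (s : List Char),
      -(cs.length : Int) ≤ i → (cs.length : Int) - i < f →
      findEndOfTokenA_loop cs d f i (c :: s) =
        findEndOfTokenA_loop cs d f (scanToClose cs c f i) s := by
  intro f
  induction f with
  | zero => intro i c s hlo hf; rfl
  | succ f ih =>
    intro i c s hlo hf
    rw [scanToClose]
    by_cases h : i < (cs.length : Int)
    · simp only [h, if_true]
      match hg : PySem.List.pyGet? cs i with
      | none =>
        exfalso
        rw [PySem.List.pyGet?_eq_none_iff] at hg
        exact hg ⟨hlo, h⟩
      | some ch =>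
        simp only
        rw [findEndOfTokenA_loop]
        simp only [h, if_true, hg]
        split_ifs with h1 h2 h3
        · -- ch = '(' : A pushes ')', B recurses into scanToClose for ')'
          subst h1
          have hj := scanToClose_ge cs f ')' (i+1)
          have hk := scanToClose_ge cs f c (scanToClose cs ')' f (i+1))
          rw [ih (i+1) ')' (c :: s) (by omega) (by omega)]
          rw [ih _ c s (by omega) (by omega)]
          exact aloop_stable cs d f (f+1) _ s (by omega) (by omega)
        · -- ch = '['
          subst h2
          have hj := scanToClose_ge cs f ']' (i+1)
          have hk := scanToClose_ge cs f c (scanToClose cs ']' f (i+1))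
          rw [ih (i+1) ']' (c :: s) (by omega) (by omega)]
          rw [ih _ c s (by omega) (by omega)]
          exact aloop_stable cs d f (f+1) _ s (by omega) (by omega)
        · -- ch = c : A pops, B returns i + 1
          exact aloop_stable cs d f (f+1) (i+1) s (by omega) (by omega)
        · -- any other character is ignored inside brackets by both
          have hj := scanToClose_ge cs f c (i+1)
          rw [ih (i+1) c s (by omega) (by omega)]
          exact aloop_stable cs d f (f+1) _ s (by omega) (by omega)
    · simp only [h, if_false]
      have e : ∀ fz st, findEndOfTokenA_loop cs d fz i st = i := by
        intro fz st
        cases fz with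
        | zero => rfl
        | succ g => simp [findEndOfTokenA_loop, h]
      rw [e, e]

theorem top_lemma (cs : List Char) (d : List String) :
    ∀ (f : Nat) (i : Int),
      -(cs.length : Int) ≤ i → (cs.length : Int) - i < f →
      findEndOfTokenA_loop cs d f i [] = findEndOfTokenB_loop cs d f i := by
  intro f
  induction f with
  | zero => intro i hlo hf; rfl
  | succ f ih =>
    intro i hlo hf
    rw [findEndOfTokenB_loop, findEndOfTokenA_loop]
    by_cases h : i < (cs.length : Int)
    · simp only [h, if_true]
      match hg : PySem.List.pyGet? cs i with
      | none => rfl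
      | some ch =>
        simp only
        split_ifs with h1 h2 h3
        · -- ch = '('
          subst h1
          have hj := scanToClose_ge cs f ')' (i+1)
          rw [key_lemma cs d f (i+1) ')' [] (by omega) (by omega)]
          exact ih _ (by omega) (by omega)
        · -- ch = '['
          subst h2
          have hj := scanToClose_ge cs f ']' (i+1)
          rw [key_lemma cs d f (i+1) ']' [] (by omega) (by omega)]
          exact ih _ (by omega) (by omega)
        · rfl
        · exact ih (i+1) (by omega) (by omega)
    · simp [h]

-- ===== VERDICT (by name: the statement is the Claim_ definition above) =====
theorem findEndOfToken_py_spec : Claim_equal_findEndOfToken_py := by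
  intro text i delimiters _ hpre
  unfold Spec_findEndOfToken_py findEndOfToken_py findEndOfToken_py_alt
  exact top_lemma text.toList delimiters _ i hpre (by omega)
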